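-- pv_equiv track=rewrite | github.com/saimahesh19/Leet_Code_Problems | python_codes/Fairindex.py | fairindex
-- ===== SOURCE A (Python) =====
-- def fairindex(a, b):
--     if len(a) != len(b):
--         return 0
--
--     n = len(a)
--     total_a = sum(a)
--     total_b = sum(b)
--
--     if total_a != total_b:
--         return 0
--
--     left_sum_a = 0
--     left_sum_b = 0
--     fair_count = 0
--
--     for k in range(1, n):
--         left_sum_a += a[k - 1]
--         left_sum_b += b[k - 1]
--
--         right_sum_a = total_a - left_sum_a
--         right_sum_b = total_b - left_sum_b
--
--         if left_sum_a == right_sum_a and left_sum_b == right_sum_b and left_sum_a == left_sum_b: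
--             fair_count += 1
--
--     return fair_count
-- ===== SOURCE B (Python) =====
-- def _half_indices(xs, total):
--     # set of split indices k where the prefix xs[0..k] sums to exactly half of total
--     s = 0
--     idx = set()
--     for k in range(len(xs) - 1):
--         s += xs[k]
--         if 2 * s == total:
--             idx.add(k)
--     return idx
--
--
-- def fairindex(a, b):
--     if len(a) != len(b):
--         return 0
--
--     total_a = sum(a)
--     total_b = sum(b)
--
--     if total_a != total_b:
--         return 0
--
--     return len(_half_indices(a, total_a) & _half_indices(b, total_b))
-- ===== Notes on version B (the rewrite author's own statement) =====
-- stated objective: alternative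
-- what changed: Instead of one fused loop testing both halves and counting, B computes for each list independently the SET of split indices where that list balances (2*prefix == total) and returns the size of the intersection of the two sets.
import Mathlib
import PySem

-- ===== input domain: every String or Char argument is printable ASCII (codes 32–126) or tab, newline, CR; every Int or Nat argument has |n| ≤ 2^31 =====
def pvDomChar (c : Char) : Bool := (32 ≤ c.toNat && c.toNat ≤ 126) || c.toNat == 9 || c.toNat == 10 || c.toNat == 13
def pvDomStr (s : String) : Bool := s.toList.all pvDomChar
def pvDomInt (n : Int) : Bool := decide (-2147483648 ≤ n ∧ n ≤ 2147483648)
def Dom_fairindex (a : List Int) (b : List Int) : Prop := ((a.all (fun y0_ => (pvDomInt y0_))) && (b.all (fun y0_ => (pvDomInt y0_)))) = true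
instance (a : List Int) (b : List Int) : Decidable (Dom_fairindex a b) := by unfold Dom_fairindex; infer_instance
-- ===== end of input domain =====

-- B computes, for each list independently, the SET of split indices where that list
-- balances (2*prefix == total), and returns the size of the intersection of the two
-- sets, instead of A's single fused loop (alternative decomposition, same O(n) cost).

-- ===== PORT A =====
def fairindex (a : List Int) (b : List Int) : Int :=
  if a.length ≠ b.length then 0
  else
    let n : Int := a.length
    let total_a := a.sum
    let total_b := b.sum
    if total_a ≠ total_b then 0
    else
      let r := (PySem.List.pyRange 1 n 1).foldl
        (fun (st : Int × Int × Int) k =>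
          let left_sum_a := st.1 + PySem.List.pyGetD a (k - 1) 0
          let left_sum_b := st.2.1 + PySem.List.pyGetD b (k - 1) 0
          let right_sum_a := total_a - left_sum_a
          let right_sum_b := total_b - left_sum_b
          let fair_count :=
            if left_sum_a == right_sum_a && left_sum_b == right_sum_b &&
               left_sum_a == left_sum_b then st.2.2 + 1 else st.2.2
          (left_sum_a, left_sum_b, fair_count))
        (0, 0, 0)
      r.2.2

-- ===== PORT B =====
-- _half_indices from Source B: running sum s, a set idx of split indices built with set.add
def halfIndices (xs : List Int) (total : Int) : PySem.Set Int :=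
  ((PySem.List.pyRange 0 ((xs.length : Int) - 1) 1).foldl
    (fun (st : Int × PySem.Set Int) k =>
      let s := st.1 + PySem.List.pyGetD xs k 0
      (s, if 2 * s == total then PySem.Set.add st.2 k else st.2))
    (0, PySem.Set.empty)).2

def fairindex_alt (a : List Int) (b : List Int) : Int :=
  if a.length ≠ b.length then 0
  else
    let total_a := a.sum
    let total_b := b.sum
    if total_a ≠ total_b then 0
    else
      (PySem.Set.len (PySem.Set.inter (halfIndices a total_a) (halfIndices b total_b)) : Int)

-- ===== PRECONDITION & SPEC =====
def Spec_fairindex (a : List Int) (b : List Int) (out : Int) : Prop := out = fairindex_alt a b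
instance (a : List Int) (b : List Int) (out : Int) : Decidable (Spec_fairindex a b out) := by unfold Spec_fairindex; infer_instance

-- ===== CLAIM (what is proved, stated in full; the proofs are below) =====
def Claim_equal_fairindex : Prop := ∀ (a : List Int) (b : List Int), Dom_fairindex a b → Spec_fairindex a b (fairindex a b)

-- ===== LEMMAS AND PROOFS =====

-- A's loop body, as a function of the totals
def aStep (ta tb : Int) (st : Int × Int × Int) (xy : Int × Int) : Int × Int × Int :=
  let la := st.1 + xy.1
  let lb := st.2.1 + xy.2
  let fc := if la == ta - la && lb == tb - lb && la == lb then st.2.2 + 1 else st.2.2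
  (la, lb, fc)

-- prefix-sum pairs of a zipped list with carries sa sb
def accumPair (sa sb : Int) : List (Int × Int) → List (Int × Int)
  | [] => []
  | (x, y) :: t => (sa + x, sb + y) :: accumPair (sa + x) (sb + y) t

-- structural form of _half_indices: indices k, k+1, … over all but the last element
def bIdx (total : Int) : Int → Int → List Int → List Int
  | _, _, [] => []
  | _, _, [_] => []
  | s, k, x :: y :: t => (if 2 * (s + x) == total then [k] else []) ++ bIdx total (s + x) (k + 1) (y :: t)

theorem mem_bIdx_ge (total : Int) : ∀ (l : List Int) (s k i : Int), i ∈ bIdx total s k l → k ≤ i := by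
  intro l
  induction l with
  | nil => intro s k i h; simp [bIdx] at h
  | cons x t ih =>
    intro s k i h
    cases t with
    | nil => simp [bIdx] at h
    | cons y u =>
      simp only [bIdx, List.mem_append] at h
      rcases h with h | h
      · split_ifs at h <;> simp_all
      · have := ih (s + x) (k + 1) i h
        omega

theorem halfIndices_fold (total : Int) :
    ∀ (rest : List Int) (xs : List Int) (k : Nat) (s : Int) (idx : PySem.Set Int),
    xs.drop k = rest → (∀ i ∈ idx, i < (k : Int)) →
    ((PySem.List.pyRange k ((xs.length : Int) - 1) 1).foldl
      (fun (st : Int × PySem.Set Int) j =>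
        (st.1 + PySem.List.pyGetD xs j 0,
          if 2 * (st.1 + PySem.List.pyGetD xs j 0) == total then
            PySem.Set.add st.2 j else st.2))
      (s, idx)).2 = idx ++ bIdx total s k rest := by
  intro rest
  induction rest with
  | nil =>
    intro xs k s idx hdrop _
    have hk : xs.length ≤ k := by
      by_contra h
      have := List.drop_eq_nil_iff.mp hdrop
      omega
    rw [PySem.List.pyRange_one_eq_nil (by omega)]
    simp [bIdx]
  | cons x t ih =>
    intro xs k s idx hdrop hidx
    have hklt : k < xs.length := by
      by_contra h
      rw [List.drop_eq_nil_of_le (by omega)] at hdrop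
      exact (List.cons_ne_nil _ _ hdrop.symm).elim
    have hx' : xs[k]? = some x := by
      have h0 : (xs.drop k)[0]? = some x := by rw [hdrop]; rfl
      simpa [List.getElem?_drop] using h0
    have hx : xs[k] = x := by
      rw [List.getElem?_eq_getElem hklt] at hx'
      exact Option.some.inj hx'
    cases t with
    | nil =>
      -- rest = [x]: k = len - 1, so the range is empty, and bIdx of a singleton is []
      have hlen1 : xs.length - k = 1 := by
        have := congrArg List.length hdrop
        simpa using this
      rw [PySem.List.pyRange_one_eq_nil (by omega)]
      simp [bIdx]
    | cons y u =>
      have hlen : xs.length - k = (y :: u).length + 1 := by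
        have := congrArg List.length hdrop
        simpa using this
      rw [PySem.List.pyRange_one_cons (by simp at hlen ⊢; omega), List.foldl_cons]
      have hget : PySem.List.pyGetD xs (k : Int) 0 = x := by
        rw [PySem.List.pyGetD_natCast]
        simp [hx, List.getD_eq_getElem?_getD, List.getElem?_eq_getElem hklt]
      simp only [hget]
      have hdrop' : xs.drop (k + 1) = y :: u := by
        have := congrArg List.tail hdrop
        simpa [List.tail_drop] using this
      have hstep : ∀ (idx' : PySem.Set Int), (∀ i ∈ idx', i < ((k+1 : Nat) : Int)) →
          ((PySem.List.pyRange ((k : Int) + 1) ((xs.length : Int) - 1) 1).foldl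
            (fun (st : Int × PySem.Set Int) j =>
              (st.1 + PySem.List.pyGetD xs j 0,
                if 2 * (st.1 + PySem.List.pyGetD xs j 0) == total then
                  PySem.Set.add st.2 j else st.2))
            (s + x, idx')).2 = idx' ++ bIdx total (s + x) ((k : Int) + 1) (y :: u) := by
        intro idx' hidx'
        have := ih xs (k + 1) (s + x) idx' hdrop' hidx'
        simpa [Nat.cast_add] using this
      by_cases hc : (2 * (s + x) == total) = true
      · simp only [hc, if_true]
        rw [PySem.Set.add_of_not_mem (by intro hmem; exact absurd (hidx _ hmem) (by omega))]
        rw [hstep (idx ++ [(k : Int)]) (by intro i hi; rcases List.mem_append.mp hi with h | h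
                                           · have := hidx i h; push_cast; omega
                                           · simp at h; push_cast; omega)]
        simp only [bIdx, hc, if_true]
        simp
      · simp only [hc, Bool.false_eq_true, if_false]
        rw [hstep idx (fun i hi => by have := hidx i hi; push_cast; omega)]
        simp only [bIdx, hc, if_false]
        simp

theorem halfIndices_eq_bIdx (xs : List Int) (total : Int) :
    halfIndices xs total = bIdx total 0 0 xs := by
  have h := halfIndices_fold total xs xs 0 0 [] (by simp) (by simp)
  simp only [Nat.cast_zero, List.nil_append] at h
  exact h

-- the intersection of the two index sets counts exactly the pairs of balanced prefixes
theorem inter_count (ta tb : Int) :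
    ∀ (a b : List Int), a.length = b.length → ∀ (sa sb k : Int),
    ((bIdx ta sa k a).filter (fun i => (bIdx tb sb k b).contains i)).length
      = (accumPair sa sb ((a.zip b).dropLast)).countP
          (fun xy => 2 * xy.1 == ta && 2 * xy.2 == tb) := by
  intro a
  induction a with
  | nil => intro b h sa sb k; cases b <;> simp_all [bIdx, accumPair]
  | cons x t ih =>
    intro b h sa sb k
    cases b with
    | nil => simp at h
    | cons x' u =>
      cases t with
      | nil =>
        cases u with
        | nil => simp [bIdx, accumPair]
        | cons _ _ => simp at h
      | cons y v =>
        cases u with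
        | nil => simp at h
        | cons y' w =>
          have hlen : (y :: v).length = (y' :: w).length := by simpa using h
          have hzip : ((x :: y :: v).zip (x' :: y' :: w)).dropLast
              = (x, x') :: ((y :: v).zip (y' :: w)).dropLast := by
            rw [List.zip_cons_cons, List.dropLast_cons_of_ne_nil (by simp)]
          rw [hzip]
          simp only [bIdx, accumPair, List.countP_cons, List.filter_append,
            List.length_append]
          have hrec : ((bIdx ta (sa + x) (k + 1) (y :: v)).filter
              (fun i => ((if 2 * (sb + x') == tb then [k] else []) ++
                bIdx tb (sb + x') (k + 1) (y' :: w)).contains i)).length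
              = ((bIdx ta (sa + x) (k + 1) (y :: v)).filter
                  (fun i => (bIdx tb (sb + x') (k + 1) (y' :: w)).contains i)).length := by
            congr 1
            apply List.filter_congr
            intro i hi
            have hk1 : k + 1 ≤ i := mem_bIdx_ge ta _ _ _ _ hi
            split_ifs with _ <;> simp <;> intro hik <;> omega
          rw [hrec, ih (y' :: w) hlen (sa + x) (sb + x') (k + 1)]
          have hknotmem : (k : Int) ∉ bIdx tb (sb + x') (k + 1) (y' :: w) := by
            intro hm
            have := mem_bIdx_ge tb _ _ _ _ hm
            omega
          by_cases hca : (2 * (sa + x) == ta) = true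
          · by_cases hcb : (2 * (sb + x') == tb) = true
            · simp [hca, hcb]
              omega
            · simp [hca, hcb, hknotmem]
          · simp [hca]

-- A's loop as countP over prefix-sum pairs (when the totals agree)
theorem loop_count (ta tb : Int) (h : ta = tb) :
    ∀ (l : List (Int × Int)) (sa sb c : Int),
    (l.foldl (aStep ta tb) (sa, sb, c)).2.2 =
      c + ((accumPair sa sb l).countP (fun xy => 2 * xy.1 == ta && 2 * xy.2 == tb) : Int) := by
  intro l
  induction l with
  | nil => intro sa sb c; simp [accumPair]
  | cons p t ih =>
    intro sa sb c
    obtain ⟨x, y⟩ := p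
    simp only [List.foldl_cons, accumPair, List.countP_cons, aStep]
    rw [ih]
    have hcond : ((sa + x == ta - (sa + x) && (sb + y == tb - (sb + y)) &&
        (sa + x == sb + y)) = (2 * (sa + x) == ta && 2 * (sb + y) == tb)) := by
      rw [Bool.eq_iff_iff]
      simp only [Bool.and_eq_true, beq_iff_eq]
      omega
    simp only [hcond]
    split_ifs with hc <;> push_cast <;> ring

theorem range_fold_take (f : (Int × Int × Int) → (Int × Int) → (Int × Int × Int))
    (a b : List Int) :
    ∀ (m : Nat), m ≤ a.length → m ≤ b.length → ∀ init,
    (List.range m).foldl (fun st k => f st (a.getD k 0, b.getD k 0)) init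
      = ((a.zip b).take m).foldl f init := by
  intro m
  induction m with
  | zero => simp
  | succ m ih =>
    intro h1 h2 init
    rw [List.range_succ, List.foldl_append, ih (by omega) (by omega), List.take_add_one,
      List.getElem?_eq_getElem (by simp; omega), List.foldl_append]
    simp [List.getD_eq_getElem?_getD, Nat.lt_of_succ_le h1, Nat.lt_of_succ_le h2]

theorem range_fold_zip (a b : List Int) (h : a.length = b.length) (ta tb : Int)
    (init : Int × Int × Int) :
    (PySem.List.pyRange 1 (a.length : Int) 1).foldl
      (fun st k => aStep ta tb st (PySem.List.pyGetD a (k - 1) 0, PySem.List.pyGetD b (k - 1) 0))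
      init
    = ((a.zip b).dropLast).foldl (aStep ta tb) init := by
  rw [PySem.List.pyRange_one, List.foldl_map]
  have hfun : (fun (st : Int × Int × Int) (k : Nat) =>
      aStep ta tb st (PySem.List.pyGetD a (1 + (k : Int) - 1) 0,
        PySem.List.pyGetD b (1 + (k : Int) - 1) 0))
      = fun st k => aStep ta tb st (a.getD k 0, b.getD k 0) := by
    funext st k
    simp
  rw [hfun, range_fold_take (aStep ta tb) a b _ (by omega) (by omega),
    List.dropLast_eq_take]
  congr 1
  simp [h]

-- ===== VERDICT (by name: the statement is the Claim_ definition above) =====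
theorem fairindex_spec : Claim_equal_fairindex := by
  intro a b _
  unfold Spec_fairindex fairindex fairindex_alt
  by_cases hl : a.length = b.length
  · simp only [hl, ne_eq, not_true_eq_false, if_false]
    by_cases ht : a.sum = b.sum
    · simp only [ht, not_true_eq_false, if_false]
      have hba : (b.length : Int) = (a.length : Int) := by exact_mod_cast hl.symm
      rw [show (fun (st : Int × Int × Int) (k : Int) =>
            (st.1 + PySem.List.pyGetD a (k - 1) 0, st.2.1 + PySem.List.pyGetD b (k - 1) 0,
              if (st.1 + PySem.List.pyGetD a (k - 1) 0 ==
                    b.sum - (st.1 + PySem.List.pyGetD a (k - 1) 0) &&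
                  st.2.1 + PySem.List.pyGetD b (k - 1) 0 ==
                    b.sum - (st.2.1 + PySem.List.pyGetD b (k - 1) 0) &&
                  st.1 + PySem.List.pyGetD a (k - 1) 0 ==
                    st.2.1 + PySem.List.pyGetD b (k - 1) 0) then
                st.2.2 + 1
              else st.2.2))
          = (fun st k => aStep b.sum b.sum st
              (PySem.List.pyGetD a (k - 1) 0, PySem.List.pyGetD b (k - 1) 0)) from rfl,
        hba, range_fold_zip a b hl, loop_count b.sum b.sum rfl,
        halfIndices_eq_bIdx, halfIndices_eq_bIdx]
      rw [show PySem.Set.inter (bIdx b.sum 0 0 a) (bIdx b.sum 0 0 b)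
            = (bIdx b.sum 0 0 a).filter (fun i => (bIdx b.sum 0 0 b).contains i) from rfl]
      rw [show ∀ l : List Int, PySem.Set.len l = l.length from fun _ => rfl]
      rw [inter_count b.sum b.sum a b hl 0 0 0]
      simp
    · simp [ht]
  · simp [hl]
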